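-- pv_equiv track=rewrite | github.com/cheatty/chipizubovzad1 | obrabot.py | count_groups_of_e
-- ===== SOURCE A (Python) =====
-- def count_groups_of_e(text):
--     count = 0
--     i = 0
--     while i < len(text):
--         if text[i] == 'E':
--             start = i
--             i += 1
--             while i < len(text) and text[i] != 'E':
--                 if text[i] == 'F':
--                     break
--                 i += 1
--             if i < len(text) and text[i] == 'E' and (i - start + 1) >= 12:
--                 count += 1
--         i += 1
--     return count
-- ===== SOURCE B (Python) =====
-- def count_groups_of_e(text):
--     # Walk the pieces of text split on 'E': piece k (k >= 1) is the interior
--     # of a candidate group opened by the 'E' before it.  A group closes at the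
--     # 'E' after its interior (which therefore cannot open another group: skip 2),
--     # is cancelled by an 'F' inside the interior, and counts when its full
--     # length (interior + both 'E's) is at least 12.
--     pieces = text.split('E')
--     count = 0
--     k = 1
--     while k < len(pieces):
--         if 'F' not in pieces[k] and k < len(pieces) - 1:
--             if len(pieces[k]) + 2 >= 12:
--                 count += 1
--             k += 2
--         else:
--             k += 1
--     return count
-- ===== Notes on version B (the rewrite author's own statement) =====
-- stated objective: faster
-- what changed: Replaces the hand-rolled per-character index scanner with nested while loops by a split-on-'E' tokenization: the string is cut into pieces once and a stride-1/stride-2 walk over the piece list counts long F-free interiors, consuming each group's closing delimiter by skipping a piece.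
import Mathlib
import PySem

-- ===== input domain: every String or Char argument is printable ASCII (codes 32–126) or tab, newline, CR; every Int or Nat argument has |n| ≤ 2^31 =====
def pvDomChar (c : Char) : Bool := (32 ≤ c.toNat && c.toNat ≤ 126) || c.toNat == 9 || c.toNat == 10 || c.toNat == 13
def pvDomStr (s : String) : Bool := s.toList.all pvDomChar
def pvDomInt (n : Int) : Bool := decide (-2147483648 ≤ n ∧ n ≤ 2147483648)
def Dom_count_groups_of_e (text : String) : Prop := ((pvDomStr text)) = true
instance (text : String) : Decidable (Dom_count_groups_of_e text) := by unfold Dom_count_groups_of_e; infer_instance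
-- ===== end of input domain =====

-- B replaces A's index-based nested-while scanner by a split-on-'E' tokenization with a
-- stride-1/stride-2 walk over the pieces (objective: faster by a constant factor; equal return values).

-- ===== PORT A =====

-- inner while: advance i while text[i] is neither 'E' nor 'F' (break at 'F')
def aInnerF (cs : List Char) (i : Nat) (fuel : Nat) : Nat :=
  match fuel with
  | 0 => i
  | fuel + 1 =>
    if h : i < cs.length then
      if cs[i] ≠ 'E' then
        if cs[i] = 'F' then i else aInnerF cs (i + 1) fuel
      else i
    else i

-- termination helper for the outer loop (cited in decreasing_by)
theorem aInner_ge (cs : List Char) (i fuel : Nat) : i ≤ aInnerF cs i fuel := by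
  induction fuel generalizing i with
  | zero => simp [aInnerF]
  | succ fuel ih =>
    simp only [aInnerF]
    split
    · split
      · split
        · exact le_refl i
        · exact le_trans (Nat.le_succ i) (ih (i + 1))
      · exact le_refl i
    · exact le_refl i

def aOuter (cs : List Char) (i : Nat) (count : Int) : Int :=
  if h : i < cs.length then
    if cs[i] = 'E' then
      let start := i
      let j := aInnerF cs (i + 1) (cs.length - (i + 1))
      let count' :=
        if hj : j < cs.length then
          if cs[j] = 'E' ∧ (12 : Int) ≤ (j : Int) - (start : Int) + 1 then count + 1 else count
        else count
      aOuter cs (j + 1) count'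
    else aOuter cs (i + 1) count
  else count
termination_by cs.length - i
decreasing_by
  · have := aInner_ge cs (i + 1) (cs.length - (i + 1))
    omega
  · omega

def count_groups_of_e (text : String) : Int := aOuter text.toList 0 0

-- ===== PORT B =====

def bLoop (pieces : List (List Char)) (k : Nat) (count : Int) : Int :=
  if k < pieces.length then
    if ¬ (PySem.Chars.isIn ['F'] (pieces.getD k []) = true) ∧ k < pieces.length - 1 then
      bLoop pieces (k + 2) (if 12 ≤ (pieces.getD k []).length + 2 then count + 1 else count)
    else bLoop pieces (k + 1) count
  else count
termination_by pieces.length - k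

def count_groups_of_e_alt (text : String) : Int :=
  bLoop (PySem.Chars.splitOn text.toList ['E']) 1 0

-- ===== PRECONDITION & SPEC =====
def Spec_count_groups_of_e (text : String) (out : Int) : Prop := out = count_groups_of_e_alt text
instance (text : String) (out : Int) : Decidable (Spec_count_groups_of_e text out) := by
  unfold Spec_count_groups_of_e; infer_instance

-- ===== CLAIM (what is proved, stated in full; the proofs are below) =====
def Claim_equal_count_groups_of_e : Prop :=
  ∀ (text : String), Dom_count_groups_of_e text → Spec_count_groups_of_e text (count_groups_of_e text)

-- ===== LEMMAS AND PROOFS =====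

-- structural version of text.split('E')
def splitOnE : List Char → List (List Char)
  | [] => [[]]
  | c :: r =>
    if c = 'E' then [] :: splitOnE r
    else
      match splitOnE r with
      | [] => [[c]]
      | h :: t => (c :: h) :: t

theorem splitOnE_ne_nil (cs : List Char) : splitOnE cs ≠ [] := by
  cases cs with
  | nil => simp [splitOnE]
  | cons c r =>
    simp only [splitOnE]
    split
    · simp
    · split <;> simp

def preCons (pre : List Char) : List (List Char) → List (List Char)
  | [] => [pre]
  | h :: t => (pre ++ h) :: t

theorem splitOn_go_eq : ∀ (fuel : Nat) (l cur : List Char) (acc : List (List Char)),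
    l.length < fuel →
    PySem.Chars.splitOn.go ['E'] fuel l cur acc = acc.reverse ++ preCons cur.reverse (splitOnE l) := by
  intro fuel
  induction fuel with
  | zero => intro l cur acc h; omega
  | succ fuel ih =>
    intro l cur acc h
    cases l with
    | nil => simp [PySem.Chars.splitOn.go, splitOnE, preCons]
    | cons c rest =>
      by_cases hc : c = 'E'
      · subst hc
        have hpre : List.isPrefixOf ['E'] ('E' :: rest) = true := by
          simp [List.isPrefixOf]
        simp only [PySem.Chars.splitOn.go, hpre, if_pos]
        rw [show List.drop (['E'] : List Char).length ('E' :: rest) = rest from rfl]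
        rw [ih rest [] ((cur.reverse) :: acc) (by simpa using Nat.lt_of_succ_lt_succ (by simpa using h))]
        rcases hsn : splitOnE rest with _ | ⟨q, r'⟩
        · exact absurd hsn (splitOnE_ne_nil rest)
        · simp [splitOnE, preCons, hsn]
      · have hpre : List.isPrefixOf ['E'] (c :: rest) = false := by
          simp [List.isPrefixOf]
          intro h'; exact absurd h'.symm hc
        simp only [PySem.Chars.splitOn.go, hpre]
        rw [if_neg (by simp)]
        rw [ih rest (c :: cur) acc (by simpa using Nat.lt_of_succ_lt_succ (by simpa using h))]
        rcases hsn : splitOnE rest with _ | ⟨q, r'⟩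
        · exact absurd hsn (splitOnE_ne_nil rest)
        · simp [splitOnE, preCons, hsn, hc]

theorem splitOn_eq (cs : List Char) : PySem.Chars.splitOn cs ['E'] = splitOnE cs := by
  rw [PySem.Chars.splitOn, splitOn_go_eq (cs.length + 1) cs [] [] (by omega)]
  rcases hsn : splitOnE cs with _ | ⟨q, r'⟩
  · exact absurd hsn (splitOnE_ne_nil cs)
  · simp [preCons]

-- the scanning state machine both ports compute: none = outside a group, some len = inside one
def machine : List Char → Option Nat → Int
  | [], _ => 0
  | c :: r, none => if c = 'E' then machine r (some 1) else machine r none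
  | c :: r, some len =>
    if c = 'E' then (if 12 ≤ len + 1 then (1 : Int) else 0) + machine r none
    else if c = 'F' then machine r none
    else machine r (some (len + 1))

def pieceCount : List (List Char) → Int
  | [] => 0
  | [_] => 0
  | p :: q :: r' =>
    if 'F' ∈ p then pieceCount (q :: r')
    else (if 12 ≤ p.length + 2 then (1 : Int) else 0) + pieceCount r'

-- value of the machine inside a group of length so far `len`, whose remaining interior is
-- piece `p` and whose following pieces are `rest`
def grpSpec (len : Nat) (p : List Char) : List (List Char) → Int
  | [] => 0
  | q :: r' =>
    if 'F' ∈ p then pieceCount (q :: r')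
    else (if 12 ≤ len + p.length + 1 then (1 : Int) else 0) + pieceCount r'

theorem pieceCount_cons_of_F {p : List Char} (rest : List (List Char)) (hF : 'F' ∈ p) :
    pieceCount (p :: rest) = pieceCount rest := by
  cases rest <;> simp [pieceCount, hF]

theorem grpSpec_of_F {p : List Char} (len : Nat) (rest : List (List Char)) (hF : 'F' ∈ p) :
    grpSpec len p rest = pieceCount rest := by
  cases rest <;> simp [grpSpec, pieceCount, hF]

theorem grpSpec_one (p : List Char) (rest : List (List Char)) :
    grpSpec 1 p rest = pieceCount (p :: rest) := by
  cases rest with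
  | nil => simp [grpSpec, pieceCount]
  | cons q r' =>
    simp only [grpSpec, pieceCount]
    have harith : 1 + p.length + 1 = p.length + 2 := by omega
    rw [harith]

theorem grpSpec_shift {c : Char} (_hc : c ≠ 'E') (hf : c ≠ 'F') (len : Nat) (q : List Char)
    (rest : List (List Char)) : grpSpec (len + 1) q rest = grpSpec len (c :: q) rest := by
  have hfm : ('F' ∈ c :: q) ↔ ('F' ∈ q) := by
    constructor
    · intro h
      rcases List.mem_cons.mp h with h | h
      · exact absurd h.symm hf
      · exact h
    · intro h; exact List.mem_cons_of_mem _ h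
  cases rest with
  | nil => simp [grpSpec]
  | cons a b =>
    simp only [grpSpec, List.length_cons]
    by_cases hq : 'F' ∈ q
    · rw [if_pos hq, if_pos (hfm.mpr hq)]
    · rw [if_neg hq, if_neg (fun h => hq (hfm.mp h))]
      have harith : len + 1 + q.length + 1 = len + (q.length + 1) + 1 := by omega
      rw [harith]
      rfl

theorem machine_eq_piece (cs : List Char) :
    (machine cs none = pieceCount (splitOnE cs).tail) ∧
    (∀ len, machine cs (some len) = grpSpec len (splitOnE cs).headI (splitOnE cs).tail) := by
  induction cs with
  | nil => constructor <;> simp [machine, splitOnE, pieceCount, grpSpec]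
  | cons c r ih =>
    rcases hsn : splitOnE r with _ | ⟨q, r'⟩
    · exact absurd hsn (splitOnE_ne_nil r)
    constructor
    · by_cases hc : c = 'E'
      · subst hc
        have hsp : splitOnE ('E' :: r) = [] :: q :: r' := by simp [splitOnE, hsn]
        rw [show machine ('E' :: r) none = machine r (some 1) from by simp [machine],
          ih.2 1, hsn, hsp, List.headI_cons, List.tail_cons, List.tail_cons, grpSpec_one]
      · have hsp : splitOnE (c :: r) = (c :: q) :: r' := by simp [splitOnE, hc, hsn]
        rw [show machine (c :: r) none = machine r none from by simp [machine, hc],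
          ih.1, hsn, hsp, List.tail_cons, List.tail_cons]
    · intro len
      by_cases hc : c = 'E'
      · subst hc
        have hsp : splitOnE ('E' :: r) = [] :: q :: r' := by simp [splitOnE, hsn]
        rw [show machine ('E' :: r) (some len)
              = (if 12 ≤ len + 1 then (1 : Int) else 0) + machine r none from by simp [machine],
          ih.1, hsn, List.tail_cons, hsp, List.headI_cons, List.tail_cons]
        simp [grpSpec]
      · by_cases hf : c = 'F'
        · subst hf
          have hsp : splitOnE ('F' :: r) = ('F' :: q) :: r' := by
            simp [splitOnE, hsn]
          rw [show machine ('F' :: r) (some len) = machine r none from by simp [machine],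
            ih.1, hsn, List.tail_cons, hsp, List.headI_cons, List.tail_cons,
            grpSpec_of_F len r' (List.mem_cons_self)]
        · have hsp : splitOnE (c :: r) = (c :: q) :: r' := by simp [splitOnE, hc, hsn]
          rw [show machine (c :: r) (some len) = machine r (some (len + 1)) from by
              simp [machine, hc, hf],
            ih.2 (len + 1), hsn, List.headI_cons, List.tail_cons, hsp, List.headI_cons,
            List.tail_cons, grpSpec_shift hc hf]

-- the inner while loop computes the rest of the current group
theorem inner_eq (cs : List Char) : ∀ (fuel i len : Nat) (count : Int),
    cs.length - i ≤ fuel → i ≤ cs.length →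
    count + machine (cs.drop i) (some len) =
      (if hj : aInnerF cs i fuel < cs.length then
        (if cs[aInnerF cs i fuel] = 'E' ∧
            (12 : Int) ≤ (aInnerF cs i fuel : Int) - ((i : Int) - (len : Int)) + 1
         then count + 1 else count)
       else count) + machine (cs.drop (aInnerF cs i fuel + 1)) none := by
  intro fuel
  induction fuel with
  | zero =>
    intro i len count hf hi
    have : i = cs.length := by omega
    subst this
    simp [aInnerF, machine, List.drop_of_length_le (le_refl cs.length),
      List.drop_of_length_le (Nat.le_succ _)]
  | succ fuel ih =>
    intro i len count hf hi
    by_cases h : i < cs.length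
    · have hdrop : cs.drop i = cs[i] :: cs.drop (i + 1) := List.drop_eq_getElem_cons h
      by_cases he : cs[i] = 'E'
      · have hj : aInnerF cs i (fuel + 1) = i := by
          simp [aInnerF, h, he]
        rw [hj, dif_pos h, hdrop]
        simp only [machine, if_pos he]
        have hcond : ((cs[i] = 'E' ∧ (12 : Int) ≤ (i : Int) - ((i : Int) - (len : Int)) + 1)
            ↔ 12 ≤ len + 1) := by
          constructor
          · intro ⟨_, hle⟩; omega
          · intro hle; exact ⟨he, by omega⟩
        by_cases hl : 12 ≤ len + 1
        · rw [if_pos hl, if_pos (hcond.mpr hl)]; ring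
        · rw [if_neg hl, if_neg (fun hx => hl (hcond.mp hx))]; ring
      · by_cases hfc : cs[i] = 'F'
        · have hj : aInnerF cs i (fuel + 1) = i := by
            simp [aInnerF, h, he, hfc]
          rw [hj, dif_pos h, hdrop]
          simp only [machine, if_neg he, if_pos hfc]
          rw [if_neg (fun hx => he hx.1)]
        · have hj : aInnerF cs i (fuel + 1) = aInnerF cs (i + 1) fuel := by
            simp [aInnerF, h, he, hfc]
          rw [hj, hdrop]
          simp only [machine, if_neg he, if_neg hfc]
          have := ih (i + 1) (len + 1) count (by omega) (by omega)
          rw [this]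
          have hcast : ((i + 1 : Nat) : Int) - ((len + 1 : Nat) : Int) = (i : Int) - (len : Int) := by
            push_cast; ring
          rw [hcast]
    · have hj : aInnerF cs i (fuel + 1) = i := by
        simp [aInnerF, h]
      rw [hj, dif_neg h]
      have : i = cs.length := by omega
      subst this
      simp [machine, List.drop_of_length_le (le_refl cs.length),
        List.drop_of_length_le (Nat.le_succ _)]

theorem outer_eq (cs : List Char) : ∀ (fuel i : Nat) (count : Int),
    cs.length - i ≤ fuel →
    aOuter cs i count = count + machine (cs.drop i) none := by
  intro fuel
  induction fuel with
  | zero =>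
    intro i count hf
    rw [aOuter, dif_neg (by omega)]
    simp [machine, List.drop_of_length_le (by omega : cs.length ≤ i)]
  | succ fuel ih =>
    intro i count hf
    by_cases h : i < cs.length
    · have hdrop : cs.drop i = cs[i] :: cs.drop (i + 1) := List.drop_eq_getElem_cons h
      rw [aOuter, dif_pos h]
      by_cases he : cs[i] = 'E'
      · rw [if_pos he]
        have hge : i + 1 ≤ aInnerF cs (i + 1) (cs.length - (i + 1)) := aInner_ge cs (i + 1) _
        rw [ih (aInnerF cs (i + 1) (cs.length - (i + 1)) + 1) _ (by omega)]
        rw [hdrop]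
        simp only [machine, if_pos he]
        have := inner_eq cs (cs.length - (i + 1)) (i + 1) 1 count (le_refl _) (by omega)
        have hcast : ((i + 1 : Nat) : Int) - ((1 : Nat) : Int) = (i : Int) := by push_cast; ring
        rw [hcast] at this
        rw [← this]
      · rw [if_neg he, ih (i + 1) count (by omega), hdrop]
        simp only [machine, if_neg he]
    · rw [aOuter, dif_neg h]
      simp [machine, List.drop_of_length_le (by omega : cs.length ≤ i)]

theorem isIn_F_iff (p : List Char) : PySem.Chars.isIn ['F'] p = true ↔ 'F' ∈ p := by
  rw [PySem.Chars.isIn_iff_infix]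
  constructor
  · intro h; exact h.mem (by simp)
  · intro h
    obtain ⟨s, t, rfl⟩ := List.append_of_mem h
    exact ⟨s, t, by simp⟩

theorem bLoop_eq (pieces : List (List Char)) : ∀ (fuel k : Nat) (count : Int),
    pieces.length - k ≤ fuel →
    bLoop pieces k count = count + pieceCount (pieces.drop k) := by
  intro fuel
  induction fuel with
  | zero =>
    intro k count hf
    rw [bLoop, if_neg (by omega)]
    simp [pieceCount, List.drop_of_length_le (by omega : pieces.length ≤ k)]
  | succ fuel ih =>
    intro k count hf
    by_cases h : k < pieces.length
    · have hget : pieces.getD k [] = pieces[k] := List.getD_eq_getElem pieces [] h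
      have hdrop : pieces.drop k = pieces[k] :: pieces.drop (k + 1) := List.drop_eq_getElem_cons h
      rw [bLoop, if_pos h, hget]
      by_cases hfp : 'F' ∈ pieces[k]
      · rw [if_neg (by simp [isIn_F_iff, hfp])]
        rw [ih (k + 1) count (by omega), hdrop, pieceCount_cons_of_F _ hfp]
      · by_cases hk : k < pieces.length - 1
        · rw [if_pos ⟨by simp [isIn_F_iff, hfp], hk⟩]
          have hdrop2 : pieces.drop (k + 1) = pieces[k + 1] :: pieces.drop (k + 2) :=
            List.drop_eq_getElem_cons (by omega)
          rw [ih (k + 2) _ (by omega), hdrop, hdrop2]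
          simp only [pieceCount, if_neg hfp]
          split <;> ring
        · rw [if_neg (fun hx => hk hx.2)]
          rw [ih (k + 1) count (by omega), hdrop]
          have hnil : pieces.drop (k + 1) = [] :=
            List.drop_of_length_le (by omega)
          rw [hnil]
          simp [pieceCount]
    · rw [bLoop, if_neg h]
      simp [pieceCount, List.drop_of_length_le (by omega : pieces.length ≤ k)]

-- ===== VERDICT (by name: the statement is the Claim_ definition above) =====
theorem count_groups_of_e_spec : Claim_equal_count_groups_of_e := by
  intro text _
  unfold Spec_count_groups_of_e count_groups_of_e count_groups_of_e_alt
  rw [splitOn_eq, bLoop_eq _ ((splitOnE text.toList).length - 1) 1 0 (le_refl _)]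
  rw [outer_eq text.toList text.toList.length 0 0 (by omega)]
  rw [List.drop_zero, List.drop_one, (machine_eq_piece text.toList).1]
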